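-- pv_equiv track=rewrite | github.com/hukun01/coding_contests | 2020/q1.py | solve
-- ===== SOURCE A (Python) =====
-- def solve(n, m):
--     seenCols = set()
--     seenRows = set()
--     cols = set()
--     rows = set()
--     k = 0
--     for r in range(n):
--         for c in range(n):
--             v = m[r][c]
--             if r == c:
--                 k += v
--             if (c, v) in seenCols:
--                 cols.add(c)
--             elif c not in cols:
--                 seenCols.add((c, v))
--             if (r, v) in seenRows:
--                 rows.add(r)
--             elif r not in rows:
--                 seenRows.add((r, v))
--     return (k, len(rows), len(cols))
-- ===== SOURCE B (Python) =====
-- def solve(n, m):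
--     k = sum(m[i][i] for i in range(n))
--     rows = sum(1 for r in range(n) if len(set(m[r][c] for c in range(n))) < n)
--     cols = sum(1 for c in range(n) if len(set(m[r][c] for r in range(n))) < n)
--     return (k, rows, cols)
-- ===== Notes on version B (the rewrite author's own statement) =====
-- stated objective: simpler
-- what changed: A's single fused streaming pass with incremental (index,value) seen-sets is replaced by three separate passes: a closed diagonal sum plus per-row and per-column duplicate tests via len(set(...)) < n.
import Mathlib
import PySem

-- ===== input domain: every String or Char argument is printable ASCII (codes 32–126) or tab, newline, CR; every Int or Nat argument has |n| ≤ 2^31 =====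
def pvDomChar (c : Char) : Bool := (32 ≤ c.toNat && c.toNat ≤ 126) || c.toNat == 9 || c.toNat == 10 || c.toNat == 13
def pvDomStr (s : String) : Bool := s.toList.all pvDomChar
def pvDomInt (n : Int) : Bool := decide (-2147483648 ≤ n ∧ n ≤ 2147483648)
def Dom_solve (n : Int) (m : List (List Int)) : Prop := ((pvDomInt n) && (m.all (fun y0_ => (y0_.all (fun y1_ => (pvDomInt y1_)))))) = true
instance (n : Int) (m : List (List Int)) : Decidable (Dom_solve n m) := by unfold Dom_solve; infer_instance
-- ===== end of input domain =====

-- B replaces A's fused streaming pass (incremental (index,value) seen-sets) by three separate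
-- passes: a diagonal sum, a per-row set-size test and a per-column set-size test (objective: simpler).

-- ===== PORT A =====
-- one (r, c) iteration of the Python loop body, state = (seenCols, seenRows, cols, rows, k)
def solveStep (m : List (List Int))
    (st : PySem.Set (Int × Int) × PySem.Set (Int × Int) × PySem.Set Int × PySem.Set Int × Int)
    (r c : Int) :
    PySem.Set (Int × Int) × PySem.Set (Int × Int) × PySem.Set Int × PySem.Set Int × Int :=
  let (seenCols, seenRows, cols, rows, k) := st
  let v := PySem.List.pyGetD (PySem.List.pyGetD m r []) c 0
  let k := if r = c then k + v else k
  let (seenCols, cols) :=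
    if PySem.Set.contains seenCols (c, v) then (seenCols, PySem.Set.add cols c)
    else if !(PySem.Set.contains cols c) then (PySem.Set.add seenCols (c, v), cols)
    else (seenCols, cols)
  let (seenRows, rows) :=
    if PySem.Set.contains seenRows (r, v) then (seenRows, PySem.Set.add rows r)
    else if !(PySem.Set.contains rows r) then (PySem.Set.add seenRows (r, v), rows)
    else (seenRows, rows)
  (seenCols, seenRows, cols, rows, k)

def solve (n : Int) (m : List (List Int)) : Int × Int × Int :=
  let st := (PySem.List.pyRange 0 n 1).foldl
    (fun st r => (PySem.List.pyRange 0 n 1).foldl (fun st c => solveStep m st r c) st)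
    (PySem.Set.empty, PySem.Set.empty, PySem.Set.empty, PySem.Set.empty, (0 : Int))
  (st.2.2.2.2, (PySem.Set.len st.2.2.2.1 : Int), (PySem.Set.len st.2.2.1 : Int))

-- ===== PORT B =====
def solve_alt (n : Int) (m : List (List Int)) : Int × Int × Int :=
  let k := ((PySem.List.pyRange 0 n 1).map
      (fun i => PySem.List.pyGetD (PySem.List.pyGetD m i []) i 0)).sum
  let rows := ((PySem.List.pyRange 0 n 1).filter (fun r =>
      decide ((PySem.Set.len (PySem.Set.ofList ((PySem.List.pyRange 0 n 1).map
        (fun c => PySem.List.pyGetD (PySem.List.pyGetD m r []) c 0))) : Int) < n))).length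
  let cols := ((PySem.List.pyRange 0 n 1).filter (fun c =>
      decide ((PySem.Set.len (PySem.Set.ofList ((PySem.List.pyRange 0 n 1).map
        (fun r => PySem.List.pyGetD (PySem.List.pyGetD m r []) c 0))) : Int) < n))).length
  (k, (rows : Int), (cols : Int))

-- ===== PRECONDITION & SPEC =====
-- Pre_ excludes exactly the inputs where Python A raises IndexError: 0 < n but fewer than n rows,
-- or one of the first n rows shorter than n.
def Pre_solve (n : Int) (m : List (List Int)) : Prop :=
  n ≤ (m.length : Int) ∧ ∀ row ∈ m.take n.toNat, n ≤ (row.length : Int)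
instance (n : Int) (m : List (List Int)) : Decidable (Pre_solve n m) := by unfold Pre_solve; infer_instance

def pvWitness_solve : Int × List (List Int) := (2, [[1, 2], [3, 3]])

def Spec_solve (n : Int) (m : List (List Int)) (out : Int × Int × Int) : Prop := out = solve_alt n m
instance (n : Int) (m : List (List Int)) (out : Int × Int × Int) : Decidable (Spec_solve n m out) := by unfold Spec_solve; infer_instance

-- ===== CLAIM (what is proved, stated in full; the proofs are below) =====
def Claim_equal_solve : Prop := ∀ (n : Int) (m : List (List Int)), Dom_solve n m → Pre_solve n m → Spec_solve n m (solve n m)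

-- ===== LEMMAS AND PROOFS =====

-- the (r, c) matrix entry both ports read (total form of m[r][c])
def pvVal (m : List (List Int)) (r c : Nat) : Int :=
  PySem.List.pyGetD (PySem.List.pyGetD m (r : Int) []) (c : Int) 0

-- row-stream (key = row, position = column) and column-stream (key = column, position = row)
def pvWR (m : List (List Int)) : Nat → Nat → Int := fun r c => pvVal m r c
def pvWC (m : List (List Int)) : Nat → Nat → Int := fun c r => pvVal m r c

-- the first `l` values of stream `t`
def pvPref (w : Nat → Nat → Int) (t l : Nat) : List Int := (List.range l).map (w t)

-- the duplicate-detector update A performs on one of its (seen, dupset) pairs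
def pvUpd (sc : PySem.Set (Int × Int)) (ds : PySem.Set Int) (key val : Int) :
    PySem.Set (Int × Int) × PySem.Set Int :=
  if PySem.Set.contains sc (key, val) then (sc, PySem.Set.add ds key)
  else if !(PySem.Set.contains ds key) then (PySem.Set.add sc (key, val), ds)
  else (sc, ds)

theorem solveStep_eq (m : List (List Int))
    (st : PySem.Set (Int × Int) × PySem.Set (Int × Int) × PySem.Set Int × PySem.Set Int × Int)
    (r c : Int) :
    solveStep m st r c =
      ((pvUpd st.1 st.2.2.1 c (PySem.List.pyGetD (PySem.List.pyGetD m r []) c 0)).1,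
       (pvUpd st.2.1 st.2.2.2.1 r (PySem.List.pyGetD (PySem.List.pyGetD m r []) c 0)).1,
       (pvUpd st.1 st.2.2.1 c (PySem.List.pyGetD (PySem.List.pyGetD m r []) c 0)).2,
       (pvUpd st.2.1 st.2.2.2.1 r (PySem.List.pyGetD (PySem.List.pyGetD m r []) c 0)).2,
       if r = c then st.2.2.2.2 + (PySem.List.pyGetD (PySem.List.pyGetD m r []) c 0) else st.2.2.2.2) := by
  obtain ⟨sc, sr, cols, rows, k⟩ := st
  simp only [solveStep, pvUpd]

-- invariant of one duplicate detector: after the stream of key t has delivered its first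
-- `len t` values, `ds` holds exactly the keys whose delivered prefix has a duplicate, and for a
-- still-duplicate-free key the seen-set holds exactly its delivered values
def pvDInv (w : Nat → Nat → Int) (len : Nat → Nat)
    (sc : PySem.Set (Int × Int)) (ds : PySem.Set Int) : Prop :=
  (∀ x : Int, x ∈ ds ↔ ∃ t : Nat, x = (t : Int) ∧ ¬ (pvPref w t (len t)).Nodup) ∧
  (∀ (t : Nat) (y : Int), (pvPref w t (len t)).Nodup →
      (((t : Int), y) ∈ sc ↔ y ∈ pvPref w t (len t))) ∧
  ds.Nodup

theorem pvDInv_congr (w : Nat → Nat → Int) (len len' : Nat → Nat)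
    (sc : PySem.Set (Int × Int)) (ds : PySem.Set Int)
    (h : pvDInv w len sc ds) (hl : ∀ t, len' t = len t) :
    pvDInv w len' sc ds := by
  have : len' = len := funext hl
  rwa [this]

theorem pvDInv_empty (w : Nat → Nat → Int) :
    pvDInv w (fun _ => 0) PySem.Set.empty PySem.Set.empty := by
  refine ⟨?_, ?_, ?_⟩ <;> simp [pvPref, PySem.Set.empty]

theorem pvPref_succ (w : Nat → Nat → Int) (t l : Nat) :
    pvPref w t (l + 1) = pvPref w t l ++ [w t l] := by
  simp [pvPref, List.range_succ]

theorem pvNodup_concat (l : List Int) (x : Int) : (l ++ [x]).Nodup ↔ l.Nodup ∧ x ∉ l := by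
  simp only [List.nodup_append]
  constructor
  · rintro ⟨h1, -, h3⟩
    exact ⟨h1, fun hx => h3 x hx x (List.mem_singleton_self x) rfl⟩
  · rintro ⟨h1, h2⟩
    refine ⟨h1, List.nodup_singleton x, ?_⟩
    intro a ha b hb
    rw [List.mem_singleton] at hb
    subst hb
    exact fun he => h2 (he ▸ ha)

theorem pvUpd_DInv (w : Nat → Nat → Int) (len len' : Nat → Nat)
    (sc : PySem.Set (Int × Int)) (ds : PySem.Set Int) (t0 : Nat)
    (h : pvDInv w len sc ds)
    (hlen : ∀ t, len' t = if t = t0 then len t0 + 1 else len t) :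
    pvDInv w len' (pvUpd sc ds (t0 : Int) (w t0 (len t0))).1
      (pvUpd sc ds (t0 : Int) (w t0 (len t0))).2 := by
  obtain ⟨hds, hsc, hnd⟩ := h
  have hother : ∀ t, t ≠ t0 → pvPref w t (len' t) = pvPref w t (len t) := by
    intro t ht; rw [hlen]; simp [ht]
  have ht0' : pvPref w t0 (len' t0) = pvPref w t0 (len t0) ++ [w t0 (len t0)] := by
    rw [hlen]; simp [pvPref_succ]
  have hcat := pvNodup_concat
  by_cases h1 : ((t0 : Int), w t0 (len t0)) ∈ sc
  · have he : pvUpd sc ds (t0 : Int) (w t0 (len t0)) = (sc, PySem.Set.add ds (t0 : Int)) := by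
      simp [pvUpd, h1]
    rw [he]; dsimp only
    have hnew : ¬ (pvPref w t0 (len' t0)).Nodup := by
      rw [ht0', hcat]
      by_cases hPn : (pvPref w t0 (len t0)).Nodup
      · exact fun hh => hh.2 ((hsc t0 _ hPn).mp h1)
      · exact fun hh => hPn hh.1
    refine ⟨?_, ?_, PySem.Set.nodup_add _ _ hnd⟩
    · intro x
      rw [PySem.Set.mem_add]
      constructor
      · rintro (hx | rfl)
        · obtain ⟨t, rfl, hdup⟩ := (hds x).mp hx
          refine ⟨t, rfl, ?_⟩
          by_cases ht : t = t0
          · subst ht; exact hnew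
          · rwa [hother t ht]
        · exact ⟨t0, rfl, hnew⟩
      · rintro ⟨t, rfl, hdup⟩
        by_cases ht : t = t0
        · subst ht; exact Or.inr rfl
        · exact Or.inl ((hds _).mpr ⟨t, rfl, by rwa [hother t ht] at hdup⟩)
    · intro t y hnt
      have ht : t ≠ t0 := by rintro rfl; exact hnew hnt
      rw [hother t ht] at hnt ⊢
      exact hsc t y hnt
  · by_cases h2 : (t0 : Int) ∈ ds
    · have he : pvUpd sc ds (t0 : Int) (w t0 (len t0)) = (sc, ds) := by
        simp [pvUpd, h1, h2]
      rw [he]; dsimp only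
      have hPn : ¬ (pvPref w t0 (len t0)).Nodup := by
        obtain ⟨t, het, hdup⟩ := (hds _).mp h2
        have : t = t0 := by exact_mod_cast het.symm
        subst this; exact hdup
      have hnew : ¬ (pvPref w t0 (len' t0)).Nodup := by
        rw [ht0', hcat]; exact fun hh => hPn hh.1
      refine ⟨?_, ?_, hnd⟩
      · intro x
        rw [hds x]
        constructor
        · rintro ⟨t, rfl, hdup⟩
          refine ⟨t, rfl, ?_⟩
          by_cases ht : t = t0
          · subst ht; exact hnew
          · rwa [hother t ht]
        · rintro ⟨t, rfl, hdup⟩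
          refine ⟨t, rfl, ?_⟩
          by_cases ht : t = t0
          · subst ht; exact hPn
          · rwa [hother t ht] at hdup
      · intro t y hnt
        have ht : t ≠ t0 := by rintro rfl; exact hnew hnt
        rw [hother t ht] at hnt ⊢
        exact hsc t y hnt
    · have he : pvUpd sc ds (t0 : Int) (w t0 (len t0)) =
          (PySem.Set.add sc ((t0 : Int), w t0 (len t0)), ds) := by
        simp [pvUpd, h1, h2]
      rw [he]; dsimp only
      have hPn : (pvPref w t0 (len t0)).Nodup := by
        by_contra hPn
        exact h2 ((hds _).mpr ⟨t0, rfl, hPn⟩)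
      have hval : w t0 (len t0) ∉ pvPref w t0 (len t0) := by
        intro hv; exact h1 ((hsc t0 _ hPn).mpr hv)
      have hnew : (pvPref w t0 (len' t0)).Nodup := by
        rw [ht0', hcat]; exact ⟨hPn, hval⟩
      refine ⟨?_, ?_, hnd⟩
      · intro x
        rw [hds x]
        constructor
        · rintro ⟨t, rfl, hdup⟩
          have ht : t ≠ t0 := by rintro rfl; exact hdup hPn
          exact ⟨t, rfl, by rwa [hother t ht]⟩
        · rintro ⟨t, rfl, hdup⟩
          have ht : t ≠ t0 := by rintro rfl; exact hdup hnew
          exact ⟨t, rfl, by rwa [hother t ht] at hdup⟩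
      · intro t y hnt
        by_cases ht : t = t0
        · subst ht
          rw [ht0'] at hnt ⊢
          rw [PySem.Set.mem_add, List.mem_append, List.mem_singleton]
          constructor
          · rintro (hy | hy)
            · exact Or.inl ((hsc _ y hPn).mp hy)
            · exact Or.inr (by simpa using hy)
          · rintro (hy | hy)
            · exact Or.inl ((hsc _ y hPn).mpr hy)
            · exact Or.inr (by simp [hy])
        · rw [hother t ht] at hnt ⊢
          rw [PySem.Set.mem_add]
          constructor
          · rintro (hy | hy)
            · exact (hsc t y hnt).mp hy
            · exfalso
              have : (t : Int) = (t0 : Int) := congrArg Prod.fst hy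
              exact ht (by exact_mod_cast this)
          · intro hy; exact Or.inl ((hsc t y hnt).mpr hy)

-- characterisation of the inner (column) loop of A for row r0
theorem pvInner_char (m : List (List Int)) (N r0 : Nat) (_hr : r0 < N) :
    ∀ j, j ≤ N → ∀ (sc sr : PySem.Set (Int × Int)) (cols rows : PySem.Set Int) (k0 : Int),
    pvDInv (pvWC m) (fun t => if t < N then r0 else 0) sc cols →
    pvDInv (pvWR m) (fun t => if t < r0 then N else 0) sr rows →
    (let st := (List.range j).foldl
        (fun st (c : Nat) => solveStep m st (r0 : Int) (c : Int)) (sc, sr, cols, rows, k0)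
     st.2.2.2.2 = k0 + (if r0 < j then pvVal m r0 r0 else 0) ∧
     pvDInv (pvWC m) (fun t => if t < j then r0 + 1 else if t < N then r0 else 0) st.1 st.2.2.1 ∧
     pvDInv (pvWR m) (fun t => if t < r0 then N else if t = r0 then j else 0) st.2.1 st.2.2.2.1) := by
  intro j
  induction j with
  | zero =>
    intro _ sc sr cols rows k0 hc hrw
    simp only [List.range_zero, List.foldl_nil]
    refine ⟨by simp, ?_, ?_⟩
    · exact pvDInv_congr _ _ _ _ _ hc (by intro t; simp)
    · exact pvDInv_congr _ _ _ _ _ hrw (by intro t; split_ifs <;> rfl)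
  | succ j ih =>
    intro hj sc sr cols rows k0 hc hrw
    have hjlt : j < N := hj
    obtain ⟨hk, hcj, hrj⟩ := ih (Nat.le_of_succ_le hj) sc sr cols rows k0 hc hrw
    rw [List.range_succ, List.foldl_append, List.foldl_cons, List.foldl_nil, solveStep_eq]
    dsimp only
    refine ⟨?_, ?_, ?_⟩
    · rw [hk]
      by_cases hr0j : r0 = j
      · subst hr0j
        rw [if_pos rfl, if_neg (lt_irrefl r0), if_pos (Nat.lt_succ_self r0)]
        simp [pvVal]
      · rw [if_neg (by exact_mod_cast hr0j)]
        by_cases h' : r0 < j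
        · rw [if_pos h', if_pos (Nat.lt_succ_of_lt h')]
        · rw [if_neg h', if_neg (by omega)]
    · have hlenj : (if j < j then r0 + 1 else if j < N then r0 else 0) = r0 := by
        simp [hjlt]
      have h := pvUpd_DInv (pvWC m)
        (fun t => if t < j then r0 + 1 else if t < N then r0 else 0)
        (fun t => if t < j + 1 then r0 + 1 else if t < N then r0 else 0)
        _ _ j hcj (by intro t; beta_reduce; split_ifs <;> omega)
      beta_reduce at h
      rw [hlenj] at h
      exact h
    · have hlenr : (if r0 < r0 then N else if r0 = r0 then j else 0) = j := by
        simp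
      have h := pvUpd_DInv (pvWR m)
        (fun t => if t < r0 then N else if t = r0 then j else 0)
        (fun t => if t < r0 then N else if t = r0 then j + 1 else 0)
        _ _ r0 hrj (by intro t; beta_reduce; split_ifs <;> omega)
      beta_reduce at h
      rw [hlenr] at h
      exact h

-- characterisation of the whole double loop of A
theorem pvOuter_char (m : List (List Int)) (N : Nat) :
    ∀ r, r ≤ N →
    (let st := (List.range r).foldl
        (fun st (r0 : Nat) => (List.range N).foldl
          (fun st (c : Nat) => solveStep m st (r0 : Int) (c : Int)) st)
        (PySem.Set.empty, PySem.Set.empty, PySem.Set.empty, PySem.Set.empty, (0 : Int))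
     st.2.2.2.2 = ((List.range r).map (fun i => pvVal m i i)).sum ∧
     pvDInv (pvWC m) (fun t => if t < N then r else 0) st.1 st.2.2.1 ∧
     pvDInv (pvWR m) (fun t => if t < r then N else 0) st.2.1 st.2.2.2.1) := by
  intro r
  induction r with
  | zero =>
    intro _
    simp only [List.range_zero, List.foldl_nil]
    refine ⟨by simp, ?_, ?_⟩
    · exact pvDInv_congr _ _ _ _ _ (pvDInv_empty _) (by intro t; split_ifs <;> omega)
    · exact pvDInv_congr _ _ _ _ _ (pvDInv_empty _) (by intro t; split_ifs <;> omega)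
  | succ r ih =>
    intro hr
    have hrN : r < N := hr
    obtain ⟨hk, hc, hrw⟩ := ih (Nat.le_of_succ_le hr)
    rw [List.range_succ, List.foldl_append, List.foldl_cons, List.foldl_nil]
    set st := (List.range r).foldl
      (fun st (r0 : Nat) => (List.range N).foldl
        (fun st (c : Nat) => solveStep m st (r0 : Int) (c : Int)) st)
      (PySem.Set.empty, PySem.Set.empty, PySem.Set.empty, PySem.Set.empty, (0 : Int)) with hstdef
    obtain ⟨sc, sr, cols, rows, k⟩ := st
    dsimp only at hk hc hrw ⊢
    obtain ⟨hk', hc', hrw'⟩ := pvInner_char m N r hrN N le_rfl sc sr cols rows k hc hrw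
    refine ⟨?_, ?_, ?_⟩
    · rw [hk', hk, if_pos hrN]
      simp
    · exact pvDInv_congr _ _ _ _ _ hc' (by intro t; split_ifs <;> omega)
    · exact pvDInv_congr _ _ _ _ _ hrw' (by intro t; split_ifs <;> omega)

-- a Nodup set whose members are the casts of the t < N with p t has the length of the filter
theorem pvSet_len_filter (N : Nat) (S : PySem.Set Int) (p : Nat → Bool)
    (hnd : S.Nodup) (hmem : ∀ x, x ∈ S ↔ ∃ t : Nat, x = (t : Int) ∧ t < N ∧ p t = true) :
    S.length = ((List.range N).filter p).length := by
  have hn2 : (((List.range N).filter p).map (fun (t : Nat) => (t : Int))).Nodup :=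
    List.Nodup.map (fun a b h => by exact_mod_cast h) ((List.nodup_range).filter p)
  have hperm : S.Perm (((List.range N).filter p).map (fun (t : Nat) => (t : Int))) := by
    rw [List.perm_ext_iff_of_nodup hnd hn2]
    intro x
    rw [hmem x]
    constructor
    · rintro ⟨t, rfl, htN, hpt⟩
      exact List.mem_map.mpr ⟨t, List.mem_filter.mpr ⟨List.mem_range.mpr htN, hpt⟩, rfl⟩
    · intro hx
      obtain ⟨t, htf, rfl⟩ := List.mem_map.mp hx
      obtain ⟨htr, hpt⟩ := List.mem_filter.mp htf
      exact ⟨t, rfl, List.mem_range.mp htr, hpt⟩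
  rw [hperm.length_eq, List.length_map]

theorem pvOfList_length_lt_iff (xs : List Int) :
    (PySem.Set.ofList xs).length < xs.length ↔ ¬ xs.Nodup := by
  constructor
  · intro h hnd
    rw [PySem.Set.ofList_eq_self_of_nodup xs hnd] at h
    exact lt_irrefl _ h
  · induction xs using List.reverseRecOn with
    | nil => intro h; exact absurd List.nodup_nil h
    | append_singleton ys x ih =>
      intro h
      rw [PySem.Set.ofList_append_singleton, List.length_append, List.length_singleton]
      by_cases hx : x ∈ ys
      · rw [PySem.Set.add_of_mem (by rwa [PySem.Set.mem_ofList])]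
        have := PySem.Set.length_ofList_le ys
        omega
      · have hys : ¬ ys.Nodup := fun hn => h ((pvNodup_concat ys x).mpr ⟨hn, hx⟩)
        have h1 := ih hys
        have h2 : (PySem.Set.add (PySem.Set.ofList ys) x).length ≤ (PySem.Set.ofList ys).length + 1 := by
          rw [PySem.Set.add_eq_ite]
          split_ifs
          · omega
          · simp
        omega

-- ===== VERDICT (by name: the statement is the Claim_ definition above) =====
theorem solve_spec : Claim_equal_solve := by
  unfold Claim_equal_solve
  intro n m _ _
  unfold Spec_solve solve solve_alt
  have hrange : PySem.List.pyRange 0 n 1 = (List.range n.toNat).map (fun (k : Nat) => (k : Int)) := by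
    rw [PySem.List.pyRange_one]
    simp
  rw [hrange]
  simp only [List.foldl_map, List.filter_map, List.map_map, List.length_map]
  obtain ⟨hk, hc, hrw⟩ := pvOuter_char m n.toNat n.toNat le_rfl
  have hncast : ∀ t : Nat, t ∈ List.range n.toNat → ((n.toNat : Nat) : Int) = n := by
    intro t ht
    have := List.mem_range.mp ht
    omega
  have key : ∀ t : Nat, t ∈ List.range n.toNat → ∀ (xs : List Int), xs.length = n.toNat →
      ((PySem.Set.ofList xs).len < n ↔ ¬ xs.Nodup) := by
    intro t ht xs hlen
    have h1 : (PySem.Set.ofList xs).len = ((PySem.Set.ofList xs).length : Int) := rfl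
    rw [h1, ← hncast t ht, Nat.cast_lt, ← hlen]
    exact pvOfList_length_lt_iff xs
  simp only [Prod.mk.injEq]
  refine ⟨?_, ?_, ?_⟩
  · rw [hk]
    rfl
  · have hrowsA := pvSet_len_filter n.toNat _
      (fun t => !decide ((pvPref (pvWR m) t n.toNat).Nodup)) hrw.2.2 ?hmemR
    case hmemR =>
      intro x
      rw [hrw.1 x]
      constructor
      · rintro ⟨t, rfl, hd⟩
        beta_reduce at hd
        by_cases ht : t < n.toNat
        · rw [if_pos ht] at hd
          exact ⟨t, rfl, ht, by simpa using hd⟩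
        · rw [if_neg ht] at hd
          exact absurd (by simp [pvPref]) hd
      · rintro ⟨t, rfl, ht, hp⟩
        refine ⟨t, rfl, ?_⟩
        beta_reduce
        rw [if_pos ht]
        simpa using hp
    have hcast : (List.foldl (fun st (r0 : Nat) => List.foldl
        (fun st (c : Nat) => solveStep m st (r0 : Int) (c : Int)) st (List.range n.toNat))
        (PySem.Set.empty, PySem.Set.empty, PySem.Set.empty, PySem.Set.empty, (0 : Int))
        (List.range n.toNat)).2.2.2.1.len =
        ((List.foldl (fun st (r0 : Nat) => List.foldl
        (fun st (c : Nat) => solveStep m st (r0 : Int) (c : Int)) st (List.range n.toNat))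
        (PySem.Set.empty, PySem.Set.empty, PySem.Set.empty, PySem.Set.empty, (0 : Int))
        (List.range n.toNat)).2.2.2.1.length : Int) := rfl
    rw [hcast, hrowsA]
    refine congrArg Nat.cast (congrArg List.length (List.filter_congr ?_))
    intro t ht
    beta_reduce
    rw [← decide_not]
    refine decide_eq_decide.mpr (key t ht _ ?_).symm
    simp [pvPref]
  · have hcolsA := pvSet_len_filter n.toNat _
      (fun t => !decide ((pvPref (pvWC m) t n.toNat).Nodup)) hc.2.2 ?hmemC
    case hmemC =>
      intro x
      rw [hc.1 x]
      constructor
      · rintro ⟨t, rfl, hd⟩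
        beta_reduce at hd
        by_cases ht : t < n.toNat
        · rw [if_pos ht] at hd
          exact ⟨t, rfl, ht, by simpa using hd⟩
        · rw [if_neg ht] at hd
          exact absurd (by simp [pvPref]) hd
      · rintro ⟨t, rfl, ht, hp⟩
        refine ⟨t, rfl, ?_⟩
        beta_reduce
        rw [if_pos ht]
        simpa using hp
    have hcast : (List.foldl (fun st (r0 : Nat) => List.foldl
        (fun st (c : Nat) => solveStep m st (r0 : Int) (c : Int)) st (List.range n.toNat))
        (PySem.Set.empty, PySem.Set.empty, PySem.Set.empty, PySem.Set.empty, (0 : Int))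
        (List.range n.toNat)).2.2.1.len =
        ((List.foldl (fun st (r0 : Nat) => List.foldl
        (fun st (c : Nat) => solveStep m st (r0 : Int) (c : Int)) st (List.range n.toNat))
        (PySem.Set.empty, PySem.Set.empty, PySem.Set.empty, PySem.Set.empty, (0 : Int))
        (List.range n.toNat)).2.2.1.length : Int) := rfl
    rw [hcast, hcolsA]
    refine congrArg Nat.cast (congrArg List.length (List.filter_congr ?_))
    intro t ht
    beta_reduce
    rw [← decide_not]
    refine decide_eq_decide.mpr (key t ht _ ?_).symm
    simp [pvPref]
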